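-- pv_equiv track=rewrite | github.com/DarkMatro/LeetCode_Solutions | Sorting/Number-of-Perfect-Pairs.py | perfectPairs
-- ===== SOURCE A (Python) =====
-- def perfectPairs(nums: list[int]) -> int:
--     """
--     ID: 3649
--     Tags:   Array, Math, Two Pointers, Sorting
--     Time:   O(NlogN)
--     Memory: O(N)
--
--     Task
--     ----------
--     You are given an integer array nums.
--
--     A pair of indices (i, j) is called perfect if the following conditions are satisfied:
--
--     i < j
--     Let a = nums[i], b = nums[j]. Then:
--     min(|a - b|, |a + b|) <= min(|a|, |b|)
--     max(|a - b|, |a + b|) >= max(|a|, |b|)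
--     Return the number of distinct perfect pairs.
--
--     Note: The absolute value |x| refers to the non-negative value of x.
--
--     Parameters
--     ----------
--     nums: list[int]
--
--     Returns
--     -------
--     out : int
--
--     Examples
--     --------
--     >>> perfectPairs([0,1,2,3])
--     2
--
--     Explanation:
--     There are 2 perfect pairs:
--
--     (i, j)	(a, b)	min(|a − b|, |a + b|)	    min(|a|, |b|)	max(|a − b|, |a + b|)	    max(|a|, |b|)
--     (1, 2)	(1, 2)	min(|1 − 2|, |1 + 2|) = 1	    1	        max(|1 − 2|, |1 + 2|) = 3	    2
--     (2, 3)	(2, 3)	min(|2 − 3|, |2 + 3|) = 1	    2	        max(|2 − 3|, |2 + 3|) = 5	    3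
--
--     >>> perfectPairs([-3,2,-1,4])
--     4
--
--     Explanation:
--     There are 4 perfect pairs:
--
--     (i, j)	(a, b)	min(|a − b|, |a + b|)	    min(|a|, |b|)	max(|a − b|, |a + b|)	        max(|a|, |b|)
--     (0, 1)	(-3, 2)	min(|-3 - 2|, |-3 + 2|) = 1	    2	        max(|-3 - 2|, |-3 + 2|) = 5	        3
--     (0, 3)	(-3, 4)	min(|-3 - 4|, |-3 + 4|) = 1	    3	        max(|-3 - 4|, |-3 + 4|) = 7	        4
--     (1, 2)	(2, -1)	min(|2 - (-1)|, |2 + (-1)|) = 1	1	        max(|2 - (-1)|, |2 + (-1)|) = 3	    2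
--     (1, 3)	(2, 4)	min(|2 - 4|, |2 + 4|) = 2	    2	        max(|2 - 4|, |2 + 4|) = 6	        4
--
--     >>> perfectPairs([1,10,100,1000])
--     0
--
--     Explanation:
--     There are no perfect pairs. Thus, the answer is 0.
--     """
--     nums = [abs(x) for x in nums]
--     nums.sort()
--
--     n, left = len(nums), 0
--     ans = (n - 1) * n // 2
--
--     for right, num in enumerate(nums):
--         while left < right and num > 2 * nums[left]:
--             left += 1
--         ans -= left
--
--     return ans
-- ===== SOURCE B (Python) =====
-- def perfectPairs(nums: list[int]) -> int:
--     # Sort absolute values; for each i, binary-search the count of elements <= 2*s[i]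
--     # (a hand-rolled bisect_right: this module uses no imports) and add the partners
--     # strictly to the right of i.  Positive counting, no two-pointer sweep.
--     s = sorted(abs(x) for x in nums)
--     n = len(s)
--     ans = 0
--     for i, v in enumerate(s):
--         t = 2 * v
--         lo, hi = 0, n
--         while lo < hi:
--             mid = (lo + hi) // 2
--             if t < s[mid]:
--                 hi = mid
--             else:
--                 lo = mid + 1
--         ans += lo - i - 1
--     return ans
-- ===== Notes on version B (the rewrite author's own statement) =====
-- stated objective: alternative
-- what changed: Replaces A's monotone two-pointer sweep with 'total pairs minus failing pairs' subtraction by positive counting: for each element a hand-rolled bisect_right binary search counts the elements <= 2*s[i] and adds the qualifying partners to its right.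
import Mathlib
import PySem

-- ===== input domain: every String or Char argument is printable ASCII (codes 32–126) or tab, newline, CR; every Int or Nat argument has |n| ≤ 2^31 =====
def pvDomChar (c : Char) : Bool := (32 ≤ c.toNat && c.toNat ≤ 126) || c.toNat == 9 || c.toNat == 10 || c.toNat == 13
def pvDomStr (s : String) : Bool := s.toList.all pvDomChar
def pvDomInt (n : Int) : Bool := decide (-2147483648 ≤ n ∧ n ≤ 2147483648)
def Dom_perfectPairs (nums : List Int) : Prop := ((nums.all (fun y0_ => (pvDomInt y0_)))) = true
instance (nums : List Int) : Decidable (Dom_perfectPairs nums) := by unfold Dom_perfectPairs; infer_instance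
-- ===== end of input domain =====

-- B replaces A's monotone two-pointer sweep and total-minus-failing-pairs trick by positive
-- counting: for each position a hand-rolled bisect_right counts elements ≤ 2*s[i] (alternative
-- algorithm of the same O(n log n) cost; no speed claim).

-- ===== PORT A =====
-- the 'while left < right and num > 2 * nums[left]: left += 1' loop
-- (structural recursion on the fuel 'right - left', which bounds the iteration count exactly)
def pvAdvanceGo (s : List Int) (num : Int) (right : Nat) : Nat → Nat → Nat
  | 0, left => left
  | fuel + 1, left =>
      if left < right ∧ 2 * s.getD left 0 < num then pvAdvanceGo s num right fuel (left + 1)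
      else left

def pvAdvance (s : List Int) (num : Int) (right : Nat) (left : Nat) : Nat :=
  pvAdvanceGo s num right (right - left) left

-- the 'for right, num in enumerate(nums)' loop carrying (left, ans)
def pvLoopA (s : List Int) : List Int → Nat → Nat → Int → Int
  | [], _, _, ans => ans
  | num :: rest, right, left, ans =>
      let l := pvAdvance s num right left
      pvLoopA s rest (right + 1) l (ans - (l : Int))

def perfectPairs (nums : List Int) : Int :=
  let s := PySem.List.sorted (nums.map (fun x => |x|)) (fun x => x)
  let n : Int := s.length
  let ans := PySem.Int.floordiv ((n - 1) * n) 2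
  pvLoopA s s 0 0 ans

-- ===== PORT B =====
-- the hand-rolled bisect_right 'while lo < hi' loop of Source B
-- (structural recursion on the fuel 'hi - lo', which bounds the iteration count)
def pvBRGo (s : List Int) (t : Int) : Nat → Nat → Nat → Nat
  | 0, lo, _ => lo
  | fuel + 1, lo, hi =>
      if lo < hi then
        let mid := (lo + hi) / 2
        if t < s.getD mid 0 then pvBRGo s t fuel lo mid else pvBRGo s t fuel (mid + 1) hi
      else lo

def pvBR (s : List Int) (t : Int) (lo hi : Nat) : Nat :=
  pvBRGo s t (hi - lo) lo hi

-- the 'for i, v in enumerate(s)' loop of Source B accumulating ans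
def pvLoopB (s : List Int) : List Int → Nat → Int → Int
  | [], _, ans => ans
  | v :: rest, i, ans =>
      pvLoopB s rest (i + 1) (ans + ((pvBR s (2 * v) 0 s.length : Int) - (i : Int) - 1))

def perfectPairs_alt (nums : List Int) : Int :=
  let s := PySem.List.sorted (nums.map (fun x => |x|)) (fun x => x)
  pvLoopB s s 0 0

-- ===== PRECONDITION & SPEC =====
def Spec_perfectPairs (nums : List Int) (out : Int) : Prop := out = perfectPairs_alt nums
instance (nums : List Int) (out : Int) : Decidable (Spec_perfectPairs nums out) := by unfold Spec_perfectPairs; infer_instance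

-- ===== CLAIM (what is proved, stated in full; the proofs are below) =====
def Claim_equal_perfectPairs : Prop := ∀ (nums : List Int), Dom_perfectPairs nums → Spec_perfectPairs nums (perfectPairs nums)

-- ===== LEMMAS AND PROOFS =====

-- number of failing partners to the left of j (what A's pointer measures)
def pvCntA (s : List Int) (j : Nat) : Nat :=
  (s.take j).countP (fun x => decide (2 * x < s.getD j 0))

-- number of elements ≤ 2*s[i] (what B's binary search measures)
def pvCntB (s : List Int) (i : Nat) : Nat :=
  s.countP (fun x => decide (x ≤ 2 * s.getD i 0))

-- indicator of a perfect pair (i, j), i < j, in the sorted list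
def pvInd (s : List Int) (i j : Nat) : Int :=
  if i < j ∧ s.getD j 0 ≤ 2 * s.getD i 0 then 1 else 0

-- countP as an indicator sum over indices
theorem pv_countP_sum (l : List Int) (p : Int → Bool) :
    (l.countP p : Int) = ∑ i ∈ Finset.range l.length, (if p (l.getD i 0) then (1 : Int) else 0) := by
  induction l with
  | nil => simp
  | cons x l ih =>
      rw [List.countP_cons]
      simp only [List.length_cons, Finset.sum_range_succ', List.getD_cons_succ, List.getD_cons_zero]
      rw [← ih]
      by_cases hx : p x <;> simp [hx]

-- a predicate true on exactly the first k positions has count k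
theorem pv_prefix_count (l : List Int) (p : Int → Bool) (k : Nat) (hk : k ≤ l.length)
    (h1 : ∀ i (h : i < l.length), i < k → p l[i])
    (h2 : ∀ i (h : i < l.length), k ≤ i → ¬ p l[i]) : l.countP p = k := by
  have hsplit : l = l.take k ++ l.drop k := (List.take_append_drop k l).symm
  rw [hsplit, List.countP_append]
  have htake : (l.take k).countP p = (l.take k).length := by
    rw [List.countP_eq_length]
    intro a ha
    obtain ⟨i, hi, rfl⟩ := List.mem_iff_getElem.mp ha
    have hik : i < k := by simp at hi; omega
    have : (l.take k)[i] = l[i]'(by omega) := List.getElem_take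
    rw [this]
    exact h1 i (by omega) hik
  have hdrop : (l.drop k).countP p = 0 := by
    rw [List.countP_eq_zero]
    intro a ha
    obtain ⟨i, hi, rfl⟩ := List.mem_iff_getElem.mp ha
    have : (l.drop k)[i] = l[k + i]'(by simp at hi; omega) := List.getElem_drop
    rw [this]
    exact h2 (k + i) (by simp at hi; omega) (by omega)
  rw [htake, hdrop, List.length_take]
  omega

theorem pv_advance_spec (s : List Int) (num : Int)
    (hmono : ∀ i j (_ : i ≤ j) (hj : j < s.length), s[i]'(by omega) ≤ s[j])
    (right : Nat) (hr : right ≤ s.length) :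
    ∀ left, left ≤ right → (∀ i (h : i < s.length), i < left → 2 * s[i] < num) →
    pvAdvance s num right left = (s.take right).countP (fun x => decide (2 * x < num)) := by
  suffices key : ∀ fuel left, right - left ≤ fuel → left ≤ right →
      (∀ i (h : i < s.length), i < left → 2 * s[i] < num) →
      pvAdvanceGo s num right fuel left = (s.take right).countP (fun x => decide (2 * x < num)) by
    intro left h1 h2
    unfold pvAdvance
    exact key (right - left) left le_rfl h1 h2
  intro fuel
  induction fuel with
  | zero =>
      intro left hf hlr hinv
      simp only [pvAdvanceGo]
      refine (pv_prefix_count _ _ left (by simp; omega) ?_ ?_).symm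
      · intro i hlen hi
        have hil : i < s.length := by simp at hlen; omega
        have he : (s.take right)[i] = s[i]'hil := List.getElem_take
        simp only [he, decide_eq_true_eq]
        exact hinv i hil hi
      · intro i hlen hi
        simp at hlen; omega
  | succ fuel ih =>
      intro left hf hlr hinv
      simp only [pvAdvanceGo]
      by_cases hc : left < right ∧ 2 * s.getD left 0 < num
      · rw [if_pos hc]
        refine ih (left + 1) (by omega) (by omega) ?_
        intro i hi hilt
        rcases Nat.lt_succ_iff_lt_or_eq.mp hilt with h | h
        · exact hinv i hi h
        · subst h
          have : s.getD i 0 = s[i] := List.getD_eq_getElem s 0 hi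
          omega
      · rw [if_neg hc]
        refine (pv_prefix_count _ _ left (by simp; omega) ?_ ?_).symm
        · intro i hlen hi
          have hil : i < s.length := by simp at hlen; omega
          have he : (s.take right)[i] = s[i]'hil := List.getElem_take
          simp only [he, decide_eq_true_eq]
          exact hinv i hil hi
        · intro i hlen hi
          have hir : i < right := by simp at hlen; omega
          have hil : i < s.length := by omega
          have hlr2 : left < right := by omega
          have hnc : ¬ (2 * s.getD left 0 < num) := fun h => hc ⟨hlr2, h⟩
          have hgl : s.getD left 0 = s[left]'(by omega) := List.getD_eq_getElem s 0 (by omega)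
          have hle : s[left]'(by omega) ≤ s[i]'hil := hmono left i hi hil
          have he : (s.take right)[i] = s[i]'hil := List.getElem_take
          simp only [he, decide_eq_true_eq]
          omega

-- positions below the count all satisfy the (downward-closed) predicate
theorem pv_prefix_prop (s : List Int) (num : Int)
    (hmono : ∀ i j (_ : i ≤ j) (hj : j < s.length), s[i]'(by omega) ≤ s[j])
    (right : Nat) (hr : right ≤ s.length) :
    ∀ i (h : i < s.length),
      i < (s.take right).countP (fun x => decide (2 * x < num)) → 2 * s[i] < num := by
  intro i hil hlt
  by_contra hnot
  have hcle : (s.take right).countP (fun x => decide (2 * x < num)) ≤ (s.take right).length :=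
    List.countP_le_length
  have hir : i < right := by simp at hcle; omega
  have hsplit : s.take right = (s.take right).take i ++ (s.take right).drop i :=
    (List.take_append_drop i (s.take right)).symm
  have h1 : ((s.take right).take i).countP (fun x => decide (2 * x < num)) ≤ i :=
    le_trans List.countP_le_length (by simp)
  have h2 : ((s.take right).drop i).countP (fun x => decide (2 * x < num)) = 0 := by
    rw [List.countP_eq_zero]
    intro a ha
    obtain ⟨m, hm, rfl⟩ := List.mem_iff_getElem.mp ha
    have hm' : i + m < right := by simp at hm; omega
    have he1 : ((s.take right).drop i)[m] = (s.take right)[i + m]'(by simp; omega) :=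
      List.getElem_drop
    have he2 : (s.take right)[i + m]'(by simp; omega) = s[i + m]'(by omega) := List.getElem_take
    have hle : s[i]'hil ≤ s[i + m]'(by omega) := hmono i (i + m) (by omega) (by omega)
    simp only [he1, he2, decide_eq_true_eq]
    omega
  have : (s.take right).countP (fun x => decide (2 * x < num)) ≤ i := by
    calc (s.take right).countP (fun x => decide (2 * x < num))
        = ((s.take right).take i).countP (fun x => decide (2 * x < num))
          + ((s.take right).drop i).countP (fun x => decide (2 * x < num)) := by
          conv_lhs => rw [hsplit]
          rw [List.countP_append]
      _ ≤ i := by omega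
  omega

theorem pv_br_spec (s : List Int) (t : Int)
    (hmono : ∀ i j (_ : i ≤ j) (hj : j < s.length), s[i]'(by omega) ≤ s[j]) :
    ∀ lo hi, hi ≤ s.length → lo ≤ hi →
    (∀ i (h : i < s.length), i < lo → s[i] ≤ t) →
    (∀ i (h : i < s.length), hi ≤ i → t < s[i]) →
    pvBR s t lo hi = s.countP (fun x => decide (x ≤ t)) := by
  suffices key : ∀ fuel lo hi, hi - lo ≤ fuel → hi ≤ s.length → lo ≤ hi →
      (∀ i (h : i < s.length), i < lo → s[i] ≤ t) →
      (∀ i (h : i < s.length), hi ≤ i → t < s[i]) →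
      pvBRGo s t fuel lo hi = s.countP (fun x => decide (x ≤ t)) by
    intro lo hi h1 h2 h3 h4
    unfold pvBR
    exact key (hi - lo) lo hi le_rfl h1 h2 h3 h4
  intro fuel
  induction fuel with
  | zero =>
      intro lo hi hf hhi hlo h1 h2
      simp only [pvBRGo]
      refine (pv_prefix_count s _ lo (by omega) ?_ ?_).symm
      · intro i hil hi'
        simp only [decide_eq_true_eq]
        exact h1 i hil hi'
      · intro i hil hi'
        simp only [decide_eq_true_eq]
        have := h2 i hil (by omega)
        omega
  | succ fuel ih =>
      intro lo hi hf hhi hlo h1 h2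
      simp only [pvBRGo]
      by_cases hc : lo < hi
      · rw [if_pos hc]
        have hmid1 : lo ≤ (lo + hi) / 2 := by omega
        have hmid2 : (lo + hi) / 2 < hi := by omega
        have hmidl : (lo + hi) / 2 < s.length := by omega
        have hgd : s.getD ((lo + hi) / 2) 0 = s[(lo + hi) / 2]'hmidl :=
          List.getD_eq_getElem s 0 hmidl
        by_cases ht : t < s.getD ((lo + hi) / 2) 0
        · rw [if_pos ht]
          refine ih lo ((lo + hi) / 2) (by omega) (by omega) (by omega) h1 ?_
          intro i hil hi'
          have := hmono ((lo + hi) / 2) i hi' hil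
          omega
        · rw [if_neg ht]
          refine ih ((lo + hi) / 2 + 1) hi (by omega) hhi (by omega) ?_ h2
          intro i hil hi'
          have h5 := hmono i ((lo + hi) / 2) (by omega) hmidl
          rw [hgd] at ht
          omega
      · rw [if_neg hc]
        refine (pv_prefix_count s _ lo (by omega) ?_ ?_).symm
        · intro i hil hi'
          simp only [decide_eq_true_eq]
          exact h1 i hil hi'
        · intro i hil hi'
          simp only [decide_eq_true_eq]
          have := h2 i hil (by omega)
          omega

theorem pv_loopA_spec (s : List Int)
    (hmono : ∀ i j (_ : i ≤ j) (hj : j < s.length), s[i]'(by omega) ≤ s[j]) :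
    ∀ rest right left ans, rest = s.drop right → left ≤ right →
    (right < s.length → ∀ i (h : i < s.length), i < left → 2 * s[i] < s.getD right 0) →
    pvLoopA s rest right left ans = ans - ∑ j ∈ Finset.Ico right s.length, (pvCntA s j : Int) := by
  intro rest
  induction rest with
  | nil =>
      intro right left ans heq hlr hinv
      have hlen : s.length ≤ right := by
        by_contra h
        rw [List.drop_eq_getElem_cons (by omega)] at heq
        exact absurd heq.symm (List.cons_ne_nil _ _)
      rw [Finset.Ico_eq_empty (by omega)]
      simp [pvLoopA]
  | cons num rest' ih =>
      intro right left ans heq hlr hinv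
      have hrlt : right < s.length := by
        by_contra h
        rw [List.drop_eq_nil_of_le (by omega)] at heq
        exact absurd heq (List.cons_ne_nil _ _)
      rw [List.drop_eq_getElem_cons hrlt] at heq
      obtain ⟨he1, he2⟩ : num = s[right] ∧ rest' = s.drop (right + 1) := by
        have := heq.symm
        injection this with a b
        exact ⟨a.symm, b.symm⟩
      subst he1
      have hgd : s.getD right 0 = s[right]'hrlt := List.getD_eq_getElem s 0 hrlt
      have hadv : pvAdvance s (s[right]'hrlt) right left
          = (s.take right).countP (fun x => decide (2 * x < s[right]'hrlt)) := by
        refine pv_advance_spec s _ hmono right (by omega) left hlr ?_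
        intro i hi hilt
        have := hinv hrlt i hi hilt
        omega
      have hcnt : (s.take right).countP (fun x => decide (2 * x < s[right]'hrlt)) = pvCntA s right := by
        unfold pvCntA
        rw [hgd]
      simp only [pvLoopA]
      rw [hadv, hcnt]
      rw [ih (right + 1) (pvCntA s right) _ he2 ?_ ?_]
      · rw [Finset.sum_eq_sum_Ico_succ_bot hrlt]
        ring
      · unfold pvCntA
        calc (s.take right).countP _ ≤ (s.take right).length := List.countP_le_length
          _ ≤ right := by simp
          _ ≤ right + 1 := by omega
      · intro hr1 i hi hilt
        have hp : 2 * s[i] < s[right]'hrlt := by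
          refine pv_prefix_prop s (s[right]'hrlt) hmono right (by omega) i hi ?_
          unfold pvCntA at hilt
          rw [hgd] at hilt
          exact hilt
        have hg1 : s.getD (right + 1) 0 = s[right + 1]'hr1 := List.getD_eq_getElem s 0 hr1
        have hle : s[right]'hrlt ≤ s[right + 1]'hr1 := hmono right (right + 1) (by omega) hr1
        omega

theorem pv_loopB_spec (s : List Int) :
    ∀ rest i ans, rest = s.drop i →
    pvLoopB s rest i ans
      = ans + ∑ j ∈ Finset.Ico i s.length, (pvBR s (2 * s.getD j 0) 0 s.length - (j : Int) - 1) := by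
  intro rest
  induction rest with
  | nil =>
      intro i ans heq
      have hlen : s.length ≤ i := by
        by_contra h
        rw [List.drop_eq_getElem_cons (by omega)] at heq
        exact absurd heq.symm (List.cons_ne_nil _ _)
      rw [Finset.Ico_eq_empty (by omega)]
      simp [pvLoopB]
  | cons v rest' ih =>
      intro i ans heq
      have hilt : i < s.length := by
        by_contra h
        rw [List.drop_eq_nil_of_le (by omega)] at heq
        exact absurd heq (List.cons_ne_nil _ _)
      rw [List.drop_eq_getElem_cons hilt] at heq
      obtain ⟨he1, he2⟩ : v = s[i] ∧ rest' = s.drop (i + 1) := by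
        have := heq.symm
        injection this with a b
        exact ⟨a.symm, b.symm⟩
      have hgd : s.getD i 0 = s[i]'hilt := List.getD_eq_getElem s 0 hilt
      simp only [pvLoopB]
      rw [ih (i + 1) _ he2, Finset.sum_eq_sum_Ico_succ_bot hilt]
      rw [hgd, he1]
      ring

theorem pv_termA (s : List Int) (j : Nat) (hj : j < s.length) :
    (j : Int) - (pvCntA s j : Int) = ∑ i ∈ Finset.range s.length, pvInd s i j := by
  have hsplit : ∑ i ∈ Finset.range s.length, pvInd s i j
      = ∑ i ∈ Finset.Ico 0 j, pvInd s i j + ∑ i ∈ Finset.Ico j s.length, pvInd s i j := by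
    rw [Finset.range_eq_Ico, ← Finset.sum_Ico_consecutive _ (Nat.zero_le j) (le_of_lt hj)]
  have hzero : ∑ i ∈ Finset.Ico j s.length, pvInd s i j = 0 := by
    refine Finset.sum_eq_zero ?_
    intro i hi
    rw [Finset.mem_Ico] at hi
    unfold pvInd
    rw [if_neg (by omega)]
  have hcnt : (pvCntA s j : Int)
      = ∑ i ∈ Finset.Ico 0 j, (if 2 * s.getD i 0 < s.getD j 0 then (1 : Int) else 0) := by
    unfold pvCntA
    rw [pv_countP_sum]
    have hlen : (s.take j).length = j := by simp; omega
    rw [hlen, Finset.range_eq_Ico]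
    refine Finset.sum_congr rfl ?_
    intro i hi
    rw [Finset.mem_Ico] at hi
    have h1 : (s.take j).getD i 0 = (s.take j)[i]'(by simp; omega) :=
      List.getD_eq_getElem _ 0 (by simp; omega)
    have h2 : (s.take j)[i]'(by simp; omega) = s[i]'(by omega) := List.getElem_take
    have h3 : s.getD i 0 = s[i]'(by omega) := List.getD_eq_getElem s 0 (by omega)
    rw [h1, h2, h3]
    simp
  have hone : ∑ i ∈ Finset.Ico 0 j, pvInd s i j
      = ∑ i ∈ Finset.Ico 0 j, ((1 : Int) - (if 2 * s.getD i 0 < s.getD j 0 then (1 : Int) else 0)) := by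
    refine Finset.sum_congr rfl ?_
    intro i hi
    rw [Finset.mem_Ico] at hi
    unfold pvInd
    by_cases hc : s.getD j 0 ≤ 2 * s.getD i 0
    · rw [if_pos ⟨by omega, hc⟩, if_neg (by omega)]
      ring
    · rw [if_neg (by intro h; exact hc h.2), if_pos (by omega)]
      ring
  rw [hsplit, hzero, hone, Finset.sum_sub_distrib, ← hcnt]
  simp

theorem pv_termB (s : List Int)
    (hmono : ∀ i j (_ : i ≤ j) (hj : j < s.length), s[i]'(by omega) ≤ s[j])
    (hpos : ∀ i (h : i < s.length), 0 ≤ s[i])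
    (i : Nat) (hi : i < s.length) :
    (pvCntB s i : Int) - (i : Int) - 1 = ∑ j ∈ Finset.range s.length, pvInd s i j := by
  have hsplit : ∑ j ∈ Finset.range s.length, pvInd s i j
      = ∑ j ∈ Finset.Ico 0 (i + 1), pvInd s i j + ∑ j ∈ Finset.Ico (i + 1) s.length, pvInd s i j := by
    rw [Finset.range_eq_Ico, ← Finset.sum_Ico_consecutive _ (Nat.zero_le (i + 1)) (by omega : i + 1 ≤ s.length)]
  have hzero : ∑ j ∈ Finset.Ico 0 (i + 1), pvInd s i j = 0 := by
    refine Finset.sum_eq_zero ?_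
    intro j hj
    rw [Finset.mem_Ico] at hj
    unfold pvInd
    rw [if_neg (by omega)]
  have hind : ∀ j ∈ Finset.Ico (i + 1) s.length,
      pvInd s i j = (if s.getD j 0 ≤ 2 * s.getD i 0 then (1 : Int) else 0) := by
    intro j hj
    rw [Finset.mem_Ico] at hj
    unfold pvInd
    by_cases hc : s.getD j 0 ≤ 2 * s.getD i 0
    · rw [if_pos ⟨by omega, hc⟩, if_pos hc]
    · rw [if_neg (by intro h; exact hc h.2), if_neg hc]
  have hcnt : (pvCntB s i : Int)
      = ∑ j ∈ Finset.range s.length, (if s.getD j 0 ≤ 2 * s.getD i 0 then (1 : Int) else 0) := by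
    unfold pvCntB
    rw [pv_countP_sum]
    refine Finset.sum_congr rfl ?_
    intro j hj
    simp
  have hones : ∑ j ∈ Finset.Ico 0 (i + 1), (if s.getD j 0 ≤ 2 * s.getD i 0 then (1 : Int) else 0)
      = (i : Int) + 1 := by
    have : ∀ j ∈ Finset.Ico 0 (i + 1), (if s.getD j 0 ≤ 2 * s.getD i 0 then (1 : Int) else 0) = 1 := by
      intro j hj
      rw [Finset.mem_Ico] at hj
      have hjl : j < s.length := by omega
      have hg1 : s.getD j 0 = s[j]'hjl := List.getD_eq_getElem s 0 hjl
      have hg2 : s.getD i 0 = s[i]'hi := List.getD_eq_getElem s 0 hi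
      have hle : s[j]'hjl ≤ s[i]'hi := hmono j i (by omega) hi
      have hp := hpos i hi
      rw [if_pos (by omega)]
    rw [Finset.sum_congr rfl this]
    simp
  rw [hsplit, hzero, Finset.sum_congr rfl hind, hcnt, Finset.range_eq_Ico,
    ← Finset.sum_Ico_consecutive _ (Nat.zero_le (i + 1)) (by omega : i + 1 ≤ s.length), hones]
  ring

theorem pv_gauss (n : Nat) :
    PySem.Int.floordiv (((n : Int) - 1) * (n : Int)) 2 = ∑ j ∈ Finset.range n, (j : Int) := by
  have key : (∑ j ∈ Finset.range n, (j : Int)) * 2 = ((n : Int) - 1) * n := by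
    induction n with
    | zero => simp
    | succ m ih =>
        rw [Finset.sum_range_succ]
        push_cast
        push_cast at ih
        linarith
  rw [PySem.Int.floordiv_eq_ediv_of_pos (by norm_num), ← key,
    Int.mul_ediv_cancel _ (by norm_num)]

-- ===== VERDICT (by name: the statement is the Claim_ definition above) =====
theorem perfectPairs_spec : Claim_equal_perfectPairs := by
  intro nums _
  unfold Spec_perfectPairs perfectPairs perfectPairs_alt
  set s : List Int := PySem.List.sorted (nums.map (fun x => |x|)) (fun x => x) with hs
  have hpair : s.Pairwise (· ≤ ·) := by
    simpa [hs] using PySem.List.sorted_pairwise (nums.map (fun x => |x|)) (fun x => x)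
  have hmono : ∀ i j (_ : i ≤ j) (hj : j < s.length), s[i]'(by omega) ≤ s[j] := by
    intro i j hij hj
    rcases Nat.lt_or_ge i j with h | h
    · exact List.pairwise_iff_getElem.mp hpair i j (by omega) hj h
    · have hij' : i = j := by omega
      subst hij'
      exact le_refl _
  have hpos : ∀ i (h : i < s.length), 0 ≤ s[i] := by
    intro i h
    have hm : s[i] ∈ s := List.getElem_mem h
    have hm2 : s[i] ∈ nums.map (fun x => |x|) := (PySem.List.mem_sorted _ _ _ _).mp hm
    obtain ⟨y, _, hy⟩ := List.mem_map.mp hm2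
    rw [← hy]
    exact abs_nonneg y
  have hA := pv_loopA_spec s hmono s 0 0
    (PySem.Int.floordiv (((s.length : Int) - 1) * (s.length : Int)) 2) (by simp) (le_refl 0)
    (by intro _ i hi hlt; omega)
  have hB := pv_loopB_spec s s 0 0 (by simp)
  rw [hA, hB]
  have hbr : ∀ j ∈ Finset.Ico 0 s.length,
      ((pvBR s (2 * s.getD j 0) 0 s.length : Int) - (j : Int) - 1)
        = (pvCntB s j : Int) - (j : Int) - 1 := by
    intro j hj
    have hb : pvBR s (2 * s.getD j 0) 0 s.length = s.countP (fun x => decide (x ≤ 2 * s.getD j 0)) :=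
      pv_br_spec s _ hmono 0 s.length le_rfl (Nat.zero_le _)
        (by intro i hi hlt; omega)
        (by intro i hi hlt; omega)
    rw [hb]
    rfl
  rw [Finset.sum_congr rfl hbr]
  rw [← Finset.range_eq_Ico, pv_gauss, ← Finset.sum_sub_distrib]
  rw [Finset.sum_congr rfl (fun j hj => pv_termA s j (Finset.mem_range.mp hj))]
  rw [Finset.sum_comm]
  rw [← Finset.sum_congr rfl (fun i hi => pv_termB s hmono hpos i (Finset.mem_range.mp hi))]
  ring
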